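-- pv_equiv track=rewrite | github.com/the-alet/python-spbu | 5.py | f
-- ===== SOURCE A (Python) =====
-- def f(s):
--     r = ''
--     for i in range(10):
--         if str(i) in s:
--             r += str(i)
--     if r == '':
--         r = "NO"
--     return r
-- ===== SOURCE B (Python) =====
-- def f(s):
--     r = ''.join(sorted(set(c for c in s if c in '0123456789')))
--     if r == '':
--         r = "NO"
--     return r
-- ===== Notes on version B (the rewrite author's own statement) =====
-- stated objective: simpler
-- what changed: B makes one pass over s collecting the digit characters into a set and emits them sorted and joined, instead of A's ten scans of s (one per digit 0-9) with string concatenation.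
import Mathlib
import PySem

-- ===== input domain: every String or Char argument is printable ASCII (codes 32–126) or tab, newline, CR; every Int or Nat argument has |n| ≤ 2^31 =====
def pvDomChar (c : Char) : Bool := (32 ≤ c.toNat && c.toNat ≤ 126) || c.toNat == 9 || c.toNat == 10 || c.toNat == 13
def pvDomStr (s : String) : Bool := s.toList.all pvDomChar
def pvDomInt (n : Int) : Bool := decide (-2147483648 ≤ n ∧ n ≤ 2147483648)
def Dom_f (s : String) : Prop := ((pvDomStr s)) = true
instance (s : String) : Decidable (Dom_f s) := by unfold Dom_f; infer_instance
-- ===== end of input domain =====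

-- B collects the digit characters of s into a set in one pass and emits them sorted and joined,
-- instead of A's ten substring scans of s (one per digit); objective: simpler.

-- ===== PORT A =====
-- literal port of A; r kept as List Char (Python str concatenation), String.ofList at the end
def f (s : String) : String :=
  let r : List Char := (PySem.List.pyRange 0 10 1).foldl
    (fun r i => if PySem.Chars.isIn (PySem.Int.toChars i) s.toList then r ++ PySem.Int.toChars i else r) []
  if r = [] then "NO" else String.ofList r

-- ===== PORT B =====
def f_alt (s : String) : String :=
  let ds : PySem.Set Char :=
    PySem.Set.ofList (s.toList.filter (fun c => PySem.Chars.isIn [c] "0123456789".toList))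
  let r : List Char :=
    PySem.Chars.join [] ((PySem.List.sorted ds (fun x => x) false).map (fun c => [c]))
  if r = [] then "NO" else String.ofList r

-- ===== PRECONDITION & SPEC =====
def Spec_f (s : String) (out : String) : Prop := out = f_alt s
instance (s : String) (out : String) : Decidable (Spec_f s out) := by unfold Spec_f; infer_instance

-- ===== CLAIM (what is proved, stated in full; the proofs are below) =====
def Claim_equal_f : Prop := ∀ (s : String), Dom_f s → Spec_f s (f s)

-- ===== LEMMAS AND PROOFS =====

-- the common value of both inner computations: the digits 0-9 present in s, in ascending order
def pvDigits : List Char := ['0','1','2','3','4','5','6','7','8','9']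

def pvPresent (s : String) : List Char := pvDigits.filter (fun c => decide (c ∈ s.toList))

-- a one-character substring test is membership
theorem pv_isIn_singleton (c : Char) (l : List Char) :
    PySem.Chars.isIn [c] l = decide (c ∈ l) := by
  rcases h : PySem.Chars.isIn [c] l with _|_
  · rw [PySem.Chars.isIn_eq_false_iff, List.singleton_infix_iff] at h; simp [h]
  · rw [PySem.Chars.isIn_iff_infix, List.singleton_infix_iff] at h; simp [h]

-- A's loop shape: conditional += of a string is filter-then-flatMap
theorem pv_foldl_if_flatMap (p : Int → Bool) (g : Int → List Char) :
    ∀ (l : List Int) (acc : List Char),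
      l.foldl (fun r i => if p i then r ++ g i else r) acc = acc ++ (l.filter p).flatMap g
  | [], acc => by simp
  | i :: t, acc => by
      by_cases h : p i <;>
        simp [List.foldl_cons, h, pv_foldl_if_flatMap p g t]

-- transfer A's Int-indexed filter to the char-indexed filter, element by element
theorem pv_filter_flatMap_toChars (s : String) :
    ∀ (il : List Int) (cl : List Char),
      il.map PySem.Int.toChars = cl.map (fun c => [c]) →
      (il.filter (fun i => PySem.Chars.isIn (PySem.Int.toChars i) s.toList)).flatMap PySem.Int.toChars
        = cl.filter (fun c => decide (c ∈ s.toList))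
  | [], [], _ => by simp
  | [], _ :: _, h => by simp at h
  | _ :: _, [], h => by simp at h
  | i :: it, c :: ct, h => by
      simp only [List.map_cons, List.cons.injEq] at h
      obtain ⟨h1, h2⟩ := h
      have ih := pv_filter_flatMap_toChars s it ct h2
      by_cases hc : c ∈ s.toList <;>
        simp [h1, pv_isIn_singleton, hc, ih]

theorem pv_A_core (s : String) :
    (PySem.List.pyRange 0 10 1).foldl
      (fun r i => if PySem.Chars.isIn (PySem.Int.toChars i) s.toList then r ++ PySem.Int.toChars i else r) []
    = pvPresent s := by
  rw [pv_foldl_if_flatMap, List.nil_append]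
  exact pv_filter_flatMap_toChars s (PySem.List.pyRange 0 10 1) pvDigits (by decide)

theorem pv_B_core (s : String) :
    PySem.Chars.join []
      ((PySem.List.sorted
          (PySem.Set.ofList (s.toList.filter (fun c => PySem.Chars.isIn [c] "0123456789".toList)))
          (fun x => x) false).map (fun c => [c]))
    = pvPresent s := by
  have hsort : PySem.List.sorted
      (PySem.Set.ofList (s.toList.filter (fun c => PySem.Chars.isIn [c] "0123456789".toList)))
      (fun x => x) false = pvPresent s := by
    apply PySem.List.sorted_eq_of_perm_of_pairwise_lt
    · rw [List.perm_ext_iff_of_nodup]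
      · intro c
        simp [pvPresent, PySem.Set.mem_ofList, List.mem_filter, pv_isIn_singleton, pvDigits]
        tauto
      · exact List.Nodup.filter _ (by decide)
      · exact PySem.Set.nodup_ofList _
    · exact List.Pairwise.filter _ (by decide)
  rw [hsort, PySem.Chars.join_nil_singletons]

-- ===== VERDICT (by name: the statement is the Claim_ definition above) =====
theorem f_spec : Claim_equal_f := by
  intro s _
  show f s = f_alt s
  simp only [f, f_alt, pv_A_core, pv_B_core]
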